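-- pv_equiv track=rewrite | github.com/universe-engine-ai/serenissima | backend/il-testimone/consciousness_measurement_implementation.py | _track_belief_updates
-- ===== SOURCE A (Python) =====
-- def _track_belief_updates(messages):
--     """Track when beliefs change"""
--     updates = []
--     update_phrases = ['i now think', 'changed my mind', 'new information']
--     for msg in messages:
--         content = msg.get('content', '').lower()
--         if any(phrase in content for phrase in update_phrases):
--             updates.append(msg)
--     return updates
-- ===== SOURCE B (Python) =====
-- def _track_belief_updates(messages):
--     """Track when beliefs change.
--
--     Staged phrase-outer passes: lowercase every content once, then for each
--     update phrase sweep all contents collecting the indices it occurs in into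
--     a set, and finally emit the messages whose index was marked, in order.
--     """
--     lowered = [msg.get('content', '').lower() for msg in messages]
--     matched = set()
--     for phrase in ['i now think', 'changed my mind', 'new information']:
--         for i, content in enumerate(lowered):
--             if phrase in content:
--                 matched.add(i)
--     return [msg for i, msg in enumerate(messages) if i in matched]
-- ===== Notes on version B (the rewrite author's own statement) =====
-- stated objective: alternative
-- what changed: Inverts the loop nesting: instead of one message-pass testing all phrases per message, B lowercases all contents in one pass, then runs one pass per phrase marking matching message indices in a set, and finally collects the marked messages in original order (correct because the output order comes from the final index-ordered pass, not from when a match was found).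
import Mathlib
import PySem

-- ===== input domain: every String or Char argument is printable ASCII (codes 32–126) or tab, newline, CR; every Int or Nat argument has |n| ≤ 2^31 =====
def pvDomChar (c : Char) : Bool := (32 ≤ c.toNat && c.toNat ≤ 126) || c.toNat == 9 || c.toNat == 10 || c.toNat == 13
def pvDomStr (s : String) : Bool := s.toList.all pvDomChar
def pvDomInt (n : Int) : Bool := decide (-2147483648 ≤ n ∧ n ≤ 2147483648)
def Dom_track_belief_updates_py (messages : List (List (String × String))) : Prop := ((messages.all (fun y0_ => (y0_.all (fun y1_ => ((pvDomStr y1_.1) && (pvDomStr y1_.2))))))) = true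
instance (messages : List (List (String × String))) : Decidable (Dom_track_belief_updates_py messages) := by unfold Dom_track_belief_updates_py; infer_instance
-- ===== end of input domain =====

-- B inverts the loop nesting: lowercases all contents once, then one pass per phrase
-- marking matching message indices in a set, then collects marked messages in order.

-- ===== PORT A =====
def track_belief_updates_py (messages : List (List (String × String))) : List (List (String × String)) :=
  messages.foldl
    (fun updates msg =>
      let content := PySem.Str.lower ((msg.lookup "content").getD "")
      if ["i now think", "changed my mind", "new information"].any
           (fun phrase => PySem.Str.isIn phrase content)
      then updates ++ [msg] else updates)
    []

-- ===== PORT B =====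
def track_belief_updates_py_alt (messages : List (List (String × String))) : List (List (String × String)) :=
  let lowered := messages.map (fun msg => PySem.Str.lower ((msg.lookup "content").getD ""))
  let matched : PySem.Set Int :=
    ["i now think", "changed my mind", "new information"].foldl
      (fun m phrase =>
        (PySem.List.enumerate lowered 0).foldl
          (fun m ic => if PySem.Str.isIn phrase ic.2 then PySem.Set.add m ic.1 else m) m)
      PySem.Set.empty
  (PySem.List.enumerate messages 0).filterMap
    (fun im => if PySem.Set.contains matched im.1 then some im.2 else none)

-- ===== PRECONDITION & SPEC =====
def Spec_track_belief_updates_py (messages : List (List (String × String))) (out : List (List (String × String))) : Prop := out = track_belief_updates_py_alt messages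
instance (messages : List (List (String × String))) (out : List (List (String × String))) : Decidable (Spec_track_belief_updates_py messages out) := by unfold Spec_track_belief_updates_py; infer_instance

-- ===== CLAIM =====
def Claim_equal_track_belief_updates_py : Prop := ∀ (messages : List (List (String × String))), Dom_track_belief_updates_py messages → Spec_track_belief_updates_py messages (track_belief_updates_py messages)

-- ===== LEMMAS AND PROOFS =====

-- membership after one phrase's marking pass over an enumerated list
theorem mem_foldl_mark {α : Type} (c : α → Bool) (l : List (Int × α)) (s : PySem.Set Int) (y : Int) :
    y ∈ l.foldl (fun m ic => if c ic.2 then PySem.Set.add m ic.1 else m) s ↔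
      y ∈ s ∨ ∃ ic ∈ l, c ic.2 ∧ y = ic.1 := by
  induction l generalizing s with
  | nil => simp
  | cons ic t ih =>
      simp only [List.foldl_cons, ih]
      by_cases h : c ic.2 = true
      · simp only [h, if_true, PySem.Set.mem_add, List.mem_cons]
        aesop
      · simp only [h, List.mem_cons]
        aesop

-- membership in the full matched set, over all phrases
theorem mem_matched {α : Type} (phrases : List String) (l : List (Int × α))
    (c : String → α → Bool) (s : PySem.Set Int) (y : Int) :
    y ∈ phrases.foldl
        (fun m p => l.foldl (fun m ic => if c p ic.2 then PySem.Set.add m ic.1 else m) m) s ↔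
      y ∈ s ∨ ∃ p ∈ phrases, ∃ ic ∈ l, c p ic.2 ∧ y = ic.1 := by
  induction phrases generalizing s with
  | nil => simp
  | cons p t ih =>
      simp only [List.foldl_cons, ih, mem_foldl_mark, List.mem_cons]
      aesop

-- filterMap over an enumeration with an index test = filter with the pointwise predicate
theorem filterMap_enumerate_filter {α : Type} (xs : List α) (s : Int) (q : Int → Bool) (p : α → Bool)
    (h : ∀ (k : Nat) (hk : k < xs.length), q (s + k) = p xs[k]) :
    (PySem.List.enumerate xs s).filterMap
        (fun im => if q im.1 then some im.2 else none) = xs.filter p := by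
  induction xs generalizing s with
  | nil => simp [PySem.List.enumerate_nil]
  | cons x t ih =>
      have h0 : q s = p x := by simpa using h 0 (by simp)
      rw [PySem.List.enumerate_cons, List.filterMap_cons]
      simp only [h0]
      have ht : (PySem.List.enumerate t (s + 1)).filterMap
          (fun im => if q im.1 then some im.2 else none) = t.filter p := by
        apply ih
        intro k hk
        have := h (k + 1) (by simpa using Nat.succ_lt_succ hk)
        simpa [add_assoc, add_comm, add_left_comm] using this
      by_cases hp : p x = true
      · simp [hp, ht]
      · simp [hp, ht]

theorem track_belief_updates_eq (messages : List (List (String × String))) :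
    track_belief_updates_py messages = track_belief_updates_py_alt messages := by
  unfold track_belief_updates_py track_belief_updates_py_alt
  rw [PySem.List.foldl_append_if_eq_filter, List.nil_append]
  set p : List (String × String) → Bool := fun msg =>
    ["i now think", "changed my mind", "new information"].any
      (fun phrase => PySem.Str.isIn phrase (PySem.Str.lower ((msg.lookup "content").getD ""))) with hp
  rw [filterMap_enumerate_filter _ 0 _ p]
  intro k hk
  rw [Bool.eq_iff_iff, PySem.Set.contains_iff, mem_matched]
  constructor
  · rintro (h | ⟨ph, hph, ic, hic, hc, hy⟩)
    · simp [PySem.Set.empty] at h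
    · rw [PySem.List.mem_enumerate_iff] at hic
      obtain ⟨j, hj, rfl⟩ := hic
      simp only [zero_add] at hy
      have hjk : k = j := by exact_mod_cast hy
      subst hjk
      rw [hp]
      simp only [List.any_eq_true]
      refine ⟨ph, hph, ?_⟩
      simpa [List.getElem_map] using hc
  · intro h
    rw [hp] at h
    simp only [List.any_eq_true] at h
    obtain ⟨ph, hph, hc⟩ := h
    right
    refine ⟨ph, hph, ((0 + (k : Int)), (messages.map
      (fun msg => PySem.Str.lower ((msg.lookup "content").getD "")))[k]'(by simpa using hk)), ?_, ?_, by simp⟩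
    · rw [PySem.List.mem_enumerate_iff]
      exact ⟨k, by simpa using hk, rfl⟩
    · simpa [List.getElem_map] using hc

-- ===== VERDICT =====
theorem track_belief_updates_py_spec : Claim_equal_track_belief_updates_py := by
  intro messages _
  exact track_belief_updates_eq messages
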